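-- pv_equiv track=rewrite | github.com/AIArmstrong/Armstrong-Artificial-Intelligence | brain/modules/openrouter/embeddings.py | _preprocess_intent
-- ===== SOURCE A (Python) =====
-- def _preprocess_intent(intent_text: str) -> str:
--     """
--     Preprocess intent text to improve embedding quality
--     """
--     # Remove timestamps and IDs
--     text = intent_text.lower()
--
--     # Extract key terms for better semantic matching
--     key_terms = []
--
--     # Architecture terms
--     if any(term in text for term in ["architecture", "design", "structure", "system"]):
--         key_terms.append("system architecture")
--
--     # Action terms
--     if any(term in text for term in ["implement", "create", "build", "add"]):
--         key_terms.append("implementation")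
--     elif any(term in text for term in ["fix", "correct", "resolve", "debug"]):
--         key_terms.append("error resolution")
--     elif any(term in text for term in ["enhance", "improve", "optimize", "upgrade"]):
--         key_terms.append("enhancement")
--
--     # Technology terms
--     if any(term in text for term in ["cache", "storage", "database", "supabase"]):
--         key_terms.append("data storage")
--
--     # Combine original text with key terms
--     enhanced_text = f"{intent_text} {' '.join(key_terms)}"
--
--     return enhanced_text
-- ===== SOURCE B (Python) =====
-- _TERM_LABELS = [
--     ("architecture", "system architecture"), ("design", "system architecture"),
--     ("structure", "system architecture"), ("system", "system architecture"),
--     ("implement", "implementation"), ("create", "implementation"),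
--     ("build", "implementation"), ("add", "implementation"),
--     ("fix", "error resolution"), ("correct", "error resolution"),
--     ("resolve", "error resolution"), ("debug", "error resolution"),
--     ("enhance", "enhancement"), ("improve", "enhancement"),
--     ("optimize", "enhancement"), ("upgrade", "enhancement"),
--     ("cache", "data storage"), ("storage", "data storage"),
--     ("database", "data storage"), ("supabase", "data storage"),
-- ]
--
--
-- def _preprocess_intent(intent_text: str) -> str:
--     # One left-to-right scan over the text: at each position record the label of
--     # every keyword starting there, then resolve the fixed label priorities.
--     text = intent_text.lower()
--     found = set()
--     for i in range(len(text)):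
--         for term, label in _TERM_LABELS:
--             if text.startswith(term, i):
--                 found.add(label)
--     key_terms = []
--     if "system architecture" in found:
--         key_terms.append("system architecture")
--     for label in ("implementation", "error resolution", "enhancement"):
--         if label in found:
--             key_terms.append(label)
--             break
--     if "data storage" in found:
--         key_terms.append("data storage")
--     return f"{intent_text} {' '.join(key_terms)}"
-- ===== Notes on version B (the rewrite author's own statement) =====
-- stated objective: alternative
-- what changed: Instead of A's per-category any(term in text) membership chain, B makes a single left-to-right scan over the positions of the lowercased text, collecting into a set the label of every keyword that starts at each position, and then resolves the fixed category priorities from that set.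
import Mathlib
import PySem

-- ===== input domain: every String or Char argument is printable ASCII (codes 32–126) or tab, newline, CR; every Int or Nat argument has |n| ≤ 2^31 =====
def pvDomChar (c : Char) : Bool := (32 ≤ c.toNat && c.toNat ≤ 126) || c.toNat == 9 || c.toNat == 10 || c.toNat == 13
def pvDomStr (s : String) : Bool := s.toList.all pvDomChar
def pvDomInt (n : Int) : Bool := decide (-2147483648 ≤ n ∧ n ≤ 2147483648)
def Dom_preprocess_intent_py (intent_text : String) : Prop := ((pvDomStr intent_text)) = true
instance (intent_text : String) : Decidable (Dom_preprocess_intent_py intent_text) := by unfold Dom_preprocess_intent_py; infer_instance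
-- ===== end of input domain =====

-- B replaces A's per-category any(term in text) chain by a single positional scan of the
-- lowercased text that collects matched-keyword labels into a set, then resolves the fixed
-- category priorities from that set (alternative decomposition; same cost).

-- ===== PORT A =====
def preprocess_intent_py (intent_text : String) : String :=
  let text := PySem.Str.lower intent_text
  let key_terms : List String := []
  let key_terms :=
    if (["architecture", "design", "structure", "system"].any (fun t => PySem.Str.isIn t text)) then
      key_terms ++ ["system architecture"] else key_terms
  let key_terms :=
    if (["implement", "create", "build", "add"].any (fun t => PySem.Str.isIn t text)) then
      key_terms ++ ["implementation"]
    else if (["fix", "correct", "resolve", "debug"].any (fun t => PySem.Str.isIn t text)) then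
      key_terms ++ ["error resolution"]
    else if (["enhance", "improve", "optimize", "upgrade"].any (fun t => PySem.Str.isIn t text)) then
      key_terms ++ ["enhancement"]
    else key_terms
  let key_terms :=
    if (["cache", "storage", "database", "supabase"].any (fun t => PySem.Str.isIn t text)) then
      key_terms ++ ["data storage"] else key_terms
  intent_text ++ " " ++ PySem.Str.join " " key_terms

-- ===== PORT B =====
def pvTermLabels : List (String × String) :=
  [("architecture", "system architecture"), ("design", "system architecture"),
   ("structure", "system architecture"), ("system", "system architecture"),
   ("implement", "implementation"), ("create", "implementation"),
   ("build", "implementation"), ("add", "implementation"),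
   ("fix", "error resolution"), ("correct", "error resolution"),
   ("resolve", "error resolution"), ("debug", "error resolution"),
   ("enhance", "enhancement"), ("improve", "enhancement"),
   ("optimize", "enhancement"), ("upgrade", "enhancement"),
   ("cache", "data storage"), ("storage", "data storage"),
   ("database", "data storage"), ("supabase", "data storage")]

-- text.startswith(term, i) is ported as a prefix test on the suffix starting at i (exact for 0 ≤ i).
def preprocess_intent_py_alt (intent_text : String) : String :=
  let text := PySem.Str.lower intent_text
  let found : PySem.Set String :=
    (List.range text.toList.length).foldl (fun acc i =>
      pvTermLabels.foldl (fun acc p =>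
        if PySem.Chars.startswith (text.toList.drop i) p.1.toList then PySem.Set.add acc p.2
        else acc) acc)
      PySem.Set.empty
  let key_terms : List String := []
  let key_terms :=
    if PySem.Set.contains found "system architecture" then key_terms ++ ["system architecture"]
    else key_terms
  let key_terms :=
    match ["implementation", "error resolution", "enhancement"].find?
        (fun l => PySem.Set.contains found l) with
    | some l => key_terms ++ [l]
    | none => key_terms
  let key_terms :=
    if PySem.Set.contains found "data storage" then key_terms ++ ["data storage"]
    else key_terms
  intent_text ++ " " ++ PySem.Str.join " " key_terms

-- ===== PRECONDITION & SPEC =====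
def Spec_preprocess_intent_py (intent_text : String) (out : String) : Prop := out = preprocess_intent_py_alt intent_text
instance (intent_text : String) (out : String) : Decidable (Spec_preprocess_intent_py intent_text out) := by unfold Spec_preprocess_intent_py; infer_instance

-- ===== CLAIM (what is proved, stated in full; the proofs are below) =====
def Claim_equal_preprocess_intent_py : Prop := ∀ (intent_text : String), Dom_preprocess_intent_py intent_text → Spec_preprocess_intent_py intent_text (preprocess_intent_py intent_text)

-- ===== LEMMAS AND PROOFS =====

-- membership after the inner conditional-add fold over the term table
theorem pv_mem_inner (text : List Char) (i : Nat) (acc : PySem.Set String) (x : String)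
    (ps : List (String × String)) :
    x ∈ ps.foldl (fun acc p =>
        if PySem.Chars.startswith (text.drop i) p.1.toList then PySem.Set.add acc p.2
        else acc) acc
      ↔ x ∈ acc ∨ ∃ p ∈ ps, PySem.Chars.startswith (text.drop i) p.1.toList = true ∧ p.2 = x := by
  induction ps generalizing acc with
  | nil => simp
  | cons p ps ih =>
    simp only [List.foldl_cons, List.exists_mem_cons_iff]
    by_cases h : PySem.Chars.startswith (text.drop i) p.1.toList = true
    · rw [if_pos h, ih]
      simp only [PySem.Set.mem_add, h, true_and]
      tauto
    · rw [if_neg h, ih]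
      simp only [h]
      tauto

-- membership after the outer fold over positions
theorem pv_mem_found (text : List Char) (l : List Nat) (acc : PySem.Set String) (x : String) :
    x ∈ l.foldl (fun acc i =>
        pvTermLabels.foldl (fun acc p =>
          if PySem.Chars.startswith (text.drop i) p.1.toList then PySem.Set.add acc p.2
          else acc) acc) acc
      ↔ x ∈ acc ∨ ∃ i ∈ l, ∃ p ∈ pvTermLabels,
          PySem.Chars.startswith (text.drop i) p.1.toList = true ∧ p.2 = x := by
  induction l generalizing acc with
  | nil => simp
  | cons i l ih =>
    simp only [List.foldl_cons, ih, pv_mem_inner, List.exists_mem_cons_iff]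
    rw [or_assoc]

-- a nonempty pattern occurs in text iff it is a prefix of some suffix with index < length
theorem pv_exists_lt_iff_isIn (text sub : List Char) (hs : sub ≠ []) :
    (∃ i < text.length, sub <+: text.drop i) ↔ PySem.Chars.isIn sub text = true := by
  rw [← PySem.Chars.exists_prefix_drop_iff_isIn]
  constructor
  · rintro ⟨i, _, h⟩; exact ⟨i, h⟩
  · rintro ⟨j, h⟩
    by_cases hj : j < text.length
    · exact ⟨j, hj, h⟩
    · exfalso
      rw [List.drop_eq_nil_of_le (by omega)] at h
      exact hs (List.prefix_nil.mp h)

-- contains on the found set = "some term with this label occurs in text"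
theorem pv_contains_found (text : List Char) (x : String) :
    PySem.Set.contains
      ((List.range text.length).foldl (fun acc i =>
        pvTermLabels.foldl (fun acc p =>
          if PySem.Chars.startswith (text.drop i) p.1.toList then PySem.Set.add acc p.2
          else acc) acc) PySem.Set.empty) x = true
    ↔ ∃ p ∈ pvTermLabels, PySem.Chars.isIn p.1.toList text = true ∧ p.2 = x := by
  have hne : ∀ p ∈ pvTermLabels, p.1.toList ≠ [] := by decide
  rw [PySem.Set.contains_iff, pv_mem_found]
  simp only [PySem.Set.empty, List.not_mem_nil, false_or, List.mem_range]
  constructor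
  · rintro ⟨i, hi, p, hp, hst, hx⟩
    exact ⟨p, hp, (pv_exists_lt_iff_isIn text p.1.toList (hne p hp)).mp
      ⟨i, hi, (PySem.Chars.startswith_iff _ _).mp hst⟩, hx⟩
  · rintro ⟨p, hp, hin, hx⟩
    obtain ⟨i, hi, h⟩ := (pv_exists_lt_iff_isIn text p.1.toList (hne p hp)).mpr hin
    exact ⟨i, hi, p, hp, (PySem.Chars.startswith_iff _ _).mpr h, hx⟩

-- the found-set test for one label = A's any-of-its-terms test
theorem pv_label (text : List Char) (x : String) (terms : List String)
    (hiff : ∀ p ∈ pvTermLabels, p.2 = x → p.1 ∈ terms)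
    (hmem : ∀ t ∈ terms, (t, x) ∈ pvTermLabels) :
    PySem.Set.contains
      ((List.range text.length).foldl (fun acc i =>
        pvTermLabels.foldl (fun acc p =>
          if PySem.Chars.startswith (text.drop i) p.1.toList then PySem.Set.add acc p.2
          else acc) acc) PySem.Set.empty) x
    = terms.any (fun t => PySem.Chars.isIn t.toList text) := by
  rw [Bool.eq_iff_iff, pv_contains_found, List.any_eq_true]
  constructor
  · rintro ⟨p, hp, hin, hx⟩
    exact ⟨p.1, hiff p hp hx, hin⟩
  · rintro ⟨t, ht, hin⟩
    exact ⟨(t, x), hmem t ht, hin, rfl⟩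

-- ===== VERDICT (by name: the statement is the Claim_ definition above) =====
set_option maxHeartbeats 1000000 in
theorem preprocess_intent_py_spec : Claim_equal_preprocess_intent_py := by
  intro s _
  unfold Spec_preprocess_intent_py preprocess_intent_py preprocess_intent_py_alt
  have ha := pv_label (PySem.Str.lower s).toList "system architecture"
    ["architecture", "design", "structure", "system"] (by decide) (by decide)
  have hb := pv_label (PySem.Str.lower s).toList "implementation"
    ["implement", "create", "build", "add"] (by decide) (by decide)
  have hc := pv_label (PySem.Str.lower s).toList "error resolution"
    ["fix", "correct", "resolve", "debug"] (by decide) (by decide)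
  have hd := pv_label (PySem.Str.lower s).toList "enhancement"
    ["enhance", "improve", "optimize", "upgrade"] (by decide) (by decide)
  have he := pv_label (PySem.Str.lower s).toList "data storage"
    ["cache", "storage", "database", "supabase"] (by decide) (by decide)
  simp only [PySem.Str.isIn_eq, List.find?, ha, hb, hc, hd, he]
  clear ha hb hc hd he
  by_cases h1 : (["architecture", "design", "structure", "system"].any
      (fun t => PySem.Chars.isIn t.toList (PySem.Str.lower s).toList)) = true <;>
  by_cases h2 : (["implement", "create", "build", "add"].any
      (fun t => PySem.Chars.isIn t.toList (PySem.Str.lower s).toList)) = true <;>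
  by_cases h3 : (["fix", "correct", "resolve", "debug"].any
      (fun t => PySem.Chars.isIn t.toList (PySem.Str.lower s).toList)) = true <;>
  by_cases h4 : (["enhance", "improve", "optimize", "upgrade"].any
      (fun t => PySem.Chars.isIn t.toList (PySem.Str.lower s).toList)) = true <;>
  by_cases h5 : (["cache", "storage", "database", "supabase"].any
      (fun t => PySem.Chars.isIn t.toList (PySem.Str.lower s).toList)) = true <;>
  simp only [Bool.not_eq_true] at * <;>
  simp only [h1, h2, h3, h4, h5] <;> rfl
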